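-- pv_equiv track=rewrite | github.com/yoonsunny17/codetree-TILs | 241024/진법 변환 2/base-conversion-2.py | solution
-- ===== SOURCE A (Python) =====
-- def change(numb, base):
--     # numb가 0이면 0
--     if numb.isdigit() and int(numb) == 0:
--         return 0
--
--     val = 0
--     power = 0
--     for digit in reversed(numb):
--         # digit이 원래 숫자면 그대로 진행
--         if digit.isdigit():
--             digit_val = int(digit)
--         # 알파벳이면 숫자로 변환
--         else:
--             digit_val = ord(digit) - ord('a') + 10
--
--         # 만약에 진법보다 더 큰 수가 있으면 변환 불가
--         if digit_val >= base:
--             return None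
--
--         val += digit_val * (base ** power)
--         power += 1 # 거듭제곱 수 갱신
--
--         # 범위 벗어나면 안됨
--         if val >= 2 ** 63:
--             return None
--
--     return val
--
-- def solution(num1, num2):
--     possible = [] # 가능한 진법들 저장할 리스트
--
--     # a진법과 b진법은 달라야 한다
--     for a in range(2, 37):
--         for b in range(2, 37):
--             if a == b:
--                 continue
--
--             # num1을 10진법으로 변환, num2를 10진법으로 변환
--             val1 = change(num1, a)
--             val2 = change(num2, b)
--
--             # 둘 다 유효한 값이고, 서로 같으면 결과 추가
--             if val1 is not None and val2 is not None and val1 == val2: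
--                 possible.append([val1, a, b])
--
--     if len(possible) == 0:
--         return 'none'
--     elif len(possible) == 1:
--         return f'{possible[0][0]} {possible[0][1]} {possible[0][2]}'
--     else:
--         return 'many'
-- ===== SOURCE B (Python) =====
-- def convert(numb, base):
--     # same conversion semantics as the module's change(), written left-to-right over enumerate
--     if numb.isdigit() and int(numb) == 0:
--         return 0
--     val = 0
--     for power, digit in enumerate(reversed(numb)):
--         d = int(digit) if digit.isdigit() else ord(digit) - 87
--         if d >= base:
--             return None
--         val += d * base ** power
--         if val >= 1 << 63:
--             return None
--     return val
--
--
-- def solution(num1, num2):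
--     # bucket the bases of num2 by converted value, convert each number once per base,
--     # and keep only the first match with an early 'many' exit
--     buckets = {}
--     for b in range(2, 37):
--         v = convert(num2, b)
--         if v is not None:
--             buckets.setdefault(v, []).append(b)
--     found = None
--     for a in range(2, 37):
--         v1 = convert(num1, a)
--         if v1 is None:
--             continue
--         for b in buckets.get(v1, []):
--             if b != a:
--                 if found is None:
--                     found = (v1, a, b)
--                 else:
--                     return 'many'
--     if found is None:
--         return 'none'
--     return f'{found[0]} {found[1]} {found[2]}'
-- ===== Notes on version B (the rewrite author's own statement) =====
-- stated objective: faster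
-- what changed: A converts both numbers inside the 35x35 base double loop (~2450 conversions) and builds the full match list; B converts each number once per base (70 conversions), groups num2's bases in a dict keyed by value, and tracks only the first match with an early 'many' exit.
import Mathlib
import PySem

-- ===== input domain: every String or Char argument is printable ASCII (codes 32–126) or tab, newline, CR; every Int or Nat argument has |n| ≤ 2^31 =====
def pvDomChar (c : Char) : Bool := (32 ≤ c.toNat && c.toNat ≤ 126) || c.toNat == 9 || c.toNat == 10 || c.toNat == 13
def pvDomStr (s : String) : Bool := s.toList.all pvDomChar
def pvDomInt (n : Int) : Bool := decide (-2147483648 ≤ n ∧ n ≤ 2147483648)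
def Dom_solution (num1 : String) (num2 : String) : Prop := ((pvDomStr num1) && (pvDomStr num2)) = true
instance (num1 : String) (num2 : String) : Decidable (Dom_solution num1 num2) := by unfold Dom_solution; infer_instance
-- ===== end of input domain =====

-- B converts each number once per base and matches through a dict of num2's values instead of
-- converting inside A's 35×35 base double loop, keeping only the first match with an early 'many' exit.

-- ===== PORT A =====
-- the for-loop of change(): digits right-to-left, accumulating val with a power counter
def changeLoop (base : Int) : List Char → Nat → Int → Option Int
  | [], _, val => some val
  | digit :: rest, power, val =>
    let digit_val : Int :=
      if PySem.Chars.isdigit digit then ((digit.toNat : Int) - 48)   -- int(digit)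
      else ((digit.toNat : Int) - 97 + 10)                            -- ord(digit) - ord('a') + 10
    if digit_val ≥ base then none
    else
      let val' := val + digit_val * base ^ power
      if val' ≥ 2 ^ 63 then none
      else changeLoop base rest (power + 1) val'

def change (numb : String) (base : Int) : Option Int :=
  if PySem.Str.strIsdigit numb && (PySem.Int.ofStr? numb == some 0) then some 0
  else changeLoop base numb.toList.reverse 0 0

def solution (num1 : String) (num2 : String) : String :=
  let possible : List (Int × Int × Int) :=
    (PySem.List.pyRange 2 37 1).foldl (fun acc a =>
      (PySem.List.pyRange 2 37 1).foldl (fun acc b =>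
        if a == b then acc
        else
          match change num1 a, change num2 b with
          | some v1, some v2 => if v1 == v2 then acc ++ [(v1, a, b)] else acc
          | _, _ => acc) acc) []
  if possible.length == 0 then "none"
  else if possible.length == 1 then
    match possible with
    | m :: _ => PySem.Int.toStr m.1 ++ " " ++ PySem.Int.toStr m.2.1 ++ " " ++ PySem.Int.toStr m.2.2
    | [] => ""   -- unreachable: length = 1
  else "many"

-- ===== PORT B =====
-- the for-loop of convert(): digits right-to-left, power = enumerate index
def convertLoop (base : Int) : List Char → Nat → Int → Option Int
  | [], _, val => some val
  | c :: rest, power, val =>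
    let d : Int :=
      if PySem.Chars.isdigit c then ((c.toNat : Int) - 48)
      else ((c.toNat : Int) - 87)                                     -- ord(digit) - 87
    if d ≥ base then none
    else
      let val' := val + d * base ^ power
      if val' ≥ 9223372036854775808 then none                          -- 1 << 63
      else convertLoop base rest (power + 1) val'

def convert (numb : String) (base : Int) : Option Int :=
  if PySem.Str.strIsdigit numb && (PySem.Int.ofStr? numb == some 0) then some 0
  else convertLoop base numb.toList.reverse 0 0

-- buckets: value of num2 in base b ↦ the bases b with that value (setdefault(v, []).append(b))
def buildBuckets (num2 : String) : PySem.Dict Int (List Int) :=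
  (PySem.List.pyRange 2 37 1).foldl (fun d b =>
    match convert num2 b with
    | some v => d.modify v [] (· ++ [b])
    | none => d) PySem.Dict.empty

-- inner 'for b in buckets.get(v1, [])' loop: first match kept, a second one returns 'many' (.inl)
def innerScan (a v1 : Int) : List Int → Option (Int × Int × Int) → Sum Unit (Option (Int × Int × Int))
  | [], found => .inr found
  | b :: rest, found =>
    if b != a then
      match found with
      | none => innerScan a v1 rest (some (v1, a, b))
      | some _ => .inl ()
    else innerScan a v1 rest found

-- outer 'for a in range(2, 37)' loop
def outerScan (num1 : String) (bk : PySem.Dict Int (List Int)) :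
    List Int → Option (Int × Int × Int) → Sum Unit (Option (Int × Int × Int))
  | [], found => .inr found
  | a :: rest, found =>
    match convert num1 a with
    | none => outerScan num1 bk rest found
    | some v1 =>
      match innerScan a v1 (bk.getD v1 []) found with
      | .inl _ => .inl ()
      | .inr f => outerScan num1 bk rest f

def solution_alt (num1 : String) (num2 : String) : String :=
  let buckets := buildBuckets num2
  match outerScan num1 buckets (PySem.List.pyRange 2 37 1) none with
  | .inl _ => "many"
  | .inr none => "none"
  | .inr (some m) => PySem.Int.toStr m.1 ++ " " ++ PySem.Int.toStr m.2.1 ++ " " ++ PySem.Int.toStr m.2.2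

-- ===== PRECONDITION & SPEC =====
def Spec_solution (num1 : String) (num2 : String) (out : String) : Prop := out = solution_alt num1 num2
instance (num1 : String) (num2 : String) (out : String) : Decidable (Spec_solution num1 num2 out) := by unfold Spec_solution; infer_instance

-- ===== CLAIM (what is proved, stated in full; the proofs are below) =====
def Claim_equal_solution : Prop := ∀ (num1 : String) (num2 : String), Dom_solution num1 num2 → Spec_solution num1 num2 (solution num1 num2)

-- ===== LEMMAS AND PROOFS =====

-- B's conversion loop equals A's (digit value and overflow bound merely written differently)
theorem convertLoop_eq_changeLoop (base : Int) :
    ∀ (l : List Char) (power : Nat) (val : Int), convertLoop base l power val = changeLoop base l power val := by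
  intro l
  induction l with
  | nil => intro _ _; rfl
  | cons c rest ih =>
    intro power val
    have hd : ((c.toNat : Int) - 87) = ((c.toNat : Int) - 97 + 10) := by ring
    have hb : (9223372036854775808 : Int) = 2 ^ 63 := by norm_num
    simp only [convertLoop, changeLoop, hd, hb]
    split <;> split_ifs <;> simp [ih]

theorem convert_eq_change (numb : String) (base : Int) : convert numb base = change numb base := by
  unfold convert change
  rw [convertLoop_eq_changeLoop]

-- the list A accumulates at outer index a (one full inner loop), as a flatMap body
def matchesFor (num1 num2 : String) (a : Int) : List (Int × Int × Int) :=
  (PySem.List.pyRange 2 37 1).flatMap (fun b =>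
    if a == b then []
    else
      match change num1 a, change num2 b with
      | some v1, some v2 => if v1 == v2 then [(v1, a, b)] else []
      | _, _ => [])

-- all of A's matches, in A's order
def allMatches (num1 num2 : String) : List (Int × Int × Int) :=
  (PySem.List.pyRange 2 37 1).flatMap (matchesFor num1 num2)

theorem possible_eq_allMatches (num1 num2 : String) :
    ((PySem.List.pyRange 2 37 1).foldl (fun acc a =>
      (PySem.List.pyRange 2 37 1).foldl (fun acc b =>
        if a == b then acc
        else
          match change num1 a, change num2 b with
          | some v1, some v2 => if v1 == v2 then acc ++ [(v1, a, b)] else acc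
          | _, _ => acc) acc) []) = allMatches num1 num2 := by
  have hinner : ∀ (a : Int) (acc : List (Int × Int × Int)),
      ((PySem.List.pyRange 2 37 1).foldl (fun acc b =>
        if a == b then acc
        else
          match change num1 a, change num2 b with
          | some v1, some v2 => if v1 == v2 then acc ++ [(v1, a, b)] else acc
          | _, _ => acc) acc) = acc ++ matchesFor num1 num2 a := by
    intro a acc
    have hstep : (fun (acc : List (Int × Int × Int)) (b : Int) =>
        if a == b then acc
        else
          match change num1 a, change num2 b with
          | some v1, some v2 => if v1 == v2 then acc ++ [(v1, a, b)] else acc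
          | _, _ => acc) = (fun acc b => acc ++
            (if a == b then []
             else
              match change num1 a, change num2 b with
              | some v1, some v2 => if v1 == v2 then [(v1, a, b)] else []
              | _, _ => [])) := by
      funext acc b
      by_cases hab : a == b
      · simp [hab]
      · simp only [hab, if_neg, Bool.false_eq_true, not_false_iff]
        cases change num1 a <;> cases change num2 b <;> simp
        split_ifs <;> simp
    rw [hstep, PySem.List.foldl_append_eq_flatMap]
    rfl
  have hstep2 : (fun (acc : List (Int × Int × Int)) (a : Int) =>
      (PySem.List.pyRange 2 37 1).foldl (fun acc b =>
        if a == b then acc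
        else
          match change num1 a, change num2 b with
          | some v1, some v2 => if v1 == v2 then acc ++ [(v1, a, b)] else acc
          | _, _ => acc) acc) = (fun acc a => acc ++ matchesFor num1 num2 a) := by
    funext acc a; exact hinner a acc
  rw [hstep2, PySem.List.foldl_append_eq_flatMap]
  rfl

theorem buckets_getD_aux (num2 : String) (v : Int) :
    ∀ (bs : List Int) (d : PySem.Dict Int (List Int)),
      ((bs.foldl (fun d b =>
        match convert num2 b with
        | some v => d.modify v [] (· ++ [b])
        | none => d) d).getD v []) = d.getD v [] ++ bs.filter (fun b => convert num2 b == some v) := by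
  intro bs
  induction bs with
  | nil => intro d; simp
  | cons b rest ih =>
    intro d
    simp only [List.foldl_cons, List.filter_cons]
    cases h : convert num2 b with
    | none => simp [ih]
    | some w =>
      by_cases hvw : v = w
      · subst hvw
        simp [ih]
      · have hne : (some w == some v) = false := by simp; omega
        simp [ih, hvw, hne, PySem.Dict.getD_modify]

theorem buckets_getD (num2 : String) (v : Int) :
    (buildBuckets num2).getD v [] = (PySem.List.pyRange 2 37 1).filter (fun b => convert num2 b == some v) := by
  unfold buildBuckets
  rw [buckets_getD_aux]
  simp

theorem guard_flatMap {p : Int → Bool} {f : Int → Int × Int × Int} :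
    ∀ (l : List Int), (l.flatMap fun b => if p b then [f b] else []) = (l.filter p).map f := by
  intro l
  induction l with
  | nil => rfl
  | cons b rest ih =>
    simp only [List.flatMap_cons, List.filter_cons]
    by_cases h : p b <;> simp [h, ih]

theorem matchesFor_none (num1 num2 : String) (a : Int) (h : convert num1 a = none) :
    matchesFor num1 num2 a = [] := by
  rw [convert_eq_change] at h
  unfold matchesFor
  rw [h]
  simp only [List.flatMap_eq_nil_iff]
  intro l hl
  split <;> rfl

theorem matchesFor_some (num1 num2 : String) (a v1 : Int) (h : convert num1 a = some v1) :
    matchesFor num1 num2 a =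
      (((buildBuckets num2).getD v1 []).filter (fun b => b != a)).map (fun b => (v1, a, b)) := by
  rw [convert_eq_change] at h
  unfold matchesFor
  rw [h, buckets_getD]
  have hbody : ∀ b : Int,
      (if a == b then []
       else
        match some v1, change num2 b with
        | some w1, some v2 => if w1 == v2 then [(w1, a, b)] else []
        | _, _ => ([] : List (Int × Int × Int))) =
      (if (b != a && change num2 b == some v1) then [(v1, a, b)] else []) := by
    intro b
    by_cases hab : a = b
    · subst hab; simp
    · cases hc : change num2 b with
      | none => simp [hab]
      | some v2 =>
        by_cases hv : v1 = v2
        · subst hv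
          simp [hab, Ne.symm hab]
        · have hv' : ¬ v2 = v1 := fun hh => hv hh.symm
          simp [hab, hv, hv']
  calc (PySem.List.pyRange 2 37 1).flatMap (fun b =>
        if a == b then []
        else
          match some v1, change num2 b with
          | some w1, some v2 => if w1 == v2 then [(w1, a, b)] else []
          | _, _ => ([] : List (Int × Int × Int)))
      = (PySem.List.pyRange 2 37 1).flatMap (fun b =>
          if (b != a && change num2 b == some v1) then [(v1, a, b)] else []) := by
        simp only [hbody]
    _ = (((PySem.List.pyRange 2 37 1).filter (fun b => change num2 b == some v1)).filter
          (fun b => b != a)).map (fun b => (v1, a, b)) := by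
        rw [guard_flatMap, List.filter_filter]
    _ = (((PySem.List.pyRange 2 37 1).filter (fun b => convert num2 b == some v1)).filter
          (fun b => b != a)).map (fun b => (v1, a, b)) := by
        simp only [convert_eq_change]

-- the early-exit state machine, denotationally: fold the match list into none / one / many
def addList : Option (Int × Int × Int) → List (Int × Int × Int) → Sum Unit (Option (Int × Int × Int))
  | found, [] => .inr found
  | none, m :: rest => addList (some m) rest
  | some _, _ :: _ => .inl ()

theorem addList_append (xs ys : List (Int × Int × Int)) (found : Option (Int × Int × Int)) :
    addList found (xs ++ ys) =
      match addList found xs with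
      | .inl _ => .inl ()
      | .inr f => addList f ys := by
  induction xs generalizing found with
  | nil => rfl
  | cons m rest ih =>
    cases found with
    | none => simpa [addList] using ih (some m)
    | some f => cases ys <;> rfl

theorem innerScan_spec (a v1 : Int) :
    ∀ (l : List Int) (found : Option (Int × Int × Int)),
      innerScan a v1 l found = addList found ((l.filter (fun b => b != a)).map (fun b => (v1, a, b))) := by
  intro l
  induction l with
  | nil => intro found; rfl
  | cons b rest ih =>
    intro found
    simp only [innerScan, List.filter_cons]
    by_cases hb : (b != a) = true
    · cases found with
      | none => simp [hb, addList, ih]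
      | some f => simp [hb, addList]
    · simp only [hb, if_neg, Bool.false_eq_true, not_false_iff]
      simp at hb
      simp [ih]

theorem outerScan_spec (num1 num2 : String) :
    ∀ (l : List Int) (found : Option (Int × Int × Int)),
      outerScan num1 (buildBuckets num2) l found =
        addList found (l.flatMap (matchesFor num1 num2)) := by
  intro l
  induction l with
  | nil => intro found; rfl
  | cons a rest ih =>
    intro found
    simp only [outerScan, List.flatMap_cons]
    cases h : convert num1 a with
    | none => rw [ih, matchesFor_none num1 num2 a h]; simp
    | some v1 =>
      dsimp only
      rw [innerScan_spec, addList_append, ← matchesFor_some num1 num2 a v1 h]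
      cases haddl : addList found (matchesFor num1 num2 a) with
      | inl u => rfl
      | inr f => exact ih f

theorem solution_eq_alt (num1 num2 : String) : solution num1 num2 = solution_alt num1 num2 := by
  simp only [solution, solution_alt]
  rw [possible_eq_allMatches, outerScan_spec num1 num2,
    show (List.flatMap (matchesFor num1 num2) (PySem.List.pyRange 2 37 1)) = allMatches num1 num2 from rfl]
  cases hm : allMatches num1 num2 with
  | nil => rfl
  | cons m1 tl =>
    cases tl with
    | nil => rfl
    | cons m2 tl2 =>
      simp [addList]

-- ===== VERDICT (by name: the statement is the Claim_ definition above) =====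
theorem solution_spec : Claim_equal_solution := by
  intro num1 num2 _
  unfold Spec_solution
  exact solution_eq_alt num1 num2
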